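-- pv_equiv track=rewrite | github.com/hjhyun98/BaekJoon-Algorithm | 프로그래머스/lv0/120884. 치킨 쿠폰/치킨 쿠폰.py | solution
-- ===== SOURCE A (Python) =====
-- def solution(chicken):
--     coupon = 0
--     cnt = 0
--     for i in range(1,chicken+1):
--         coupon += 1
--         if coupon == 10:
--             coupon = 1
--             cnt +=1
--     return cnt
-- ===== SOURCE B (Python) =====
-- def solution(chicken):
--     # closed form: each bonus chicken costs 9 net coupons after the first one kept
--     return max(0, (chicken - 1) // 9)
-- ===== Notes on version B (the rewrite author's own statement) =====
-- stated objective: faster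
-- what changed: replaced the per-chicken simulation loop with the closed form max(0,(chicken-1)//9)
import Mathlib
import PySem

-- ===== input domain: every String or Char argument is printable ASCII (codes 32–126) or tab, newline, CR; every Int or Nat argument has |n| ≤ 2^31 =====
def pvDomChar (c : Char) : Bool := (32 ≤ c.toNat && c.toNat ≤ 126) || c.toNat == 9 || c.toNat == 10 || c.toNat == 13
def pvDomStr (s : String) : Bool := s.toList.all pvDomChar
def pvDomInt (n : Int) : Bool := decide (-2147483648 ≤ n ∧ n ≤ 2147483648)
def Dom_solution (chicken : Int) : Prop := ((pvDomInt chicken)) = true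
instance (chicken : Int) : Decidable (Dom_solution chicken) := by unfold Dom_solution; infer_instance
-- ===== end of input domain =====

-- B replaces A's per-chicken simulation loop with the closed form max(0,(chicken-1)//9) (faster).

-- ===== PORT A =====
-- loop body of A: coupon += 1; if coupon == 10: coupon = 1; cnt += 1
def solStep (s : Int × Int) (_i : Int) : Int × Int :=
  let c := s.1 + 1
  if c = 10 then (1, s.2 + 1) else (c, s.2)

def solution (chicken : Int) : Int :=
  ((PySem.List.pyRange 1 (chicken + 1) 1).foldl solStep (0, 0)).2

-- ===== PORT B =====
def solution_alt (chicken : Int) : Int :=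
  max 0 (PySem.Int.floordiv (chicken - 1) 9)

-- ===== PRECONDITION & SPEC =====
def Spec_solution (chicken : Int) (out : Int) : Prop := out = solution_alt chicken
instance (chicken : Int) (out : Int) : Decidable (Spec_solution chicken out) := by unfold Spec_solution; infer_instance

-- ===== CLAIM (what is proved, stated in full; the proofs are below) =====
def Claim_equal_solution : Prop := ∀ (chicken : Int), Dom_solution chicken → Spec_solution chicken (solution chicken)

-- ===== LEMMAS AND PROOFS =====

-- the loop ignores the element values: the fold only depends on the list length
def solIter (n : Nat) (s : Int × Int) : Int × Int :=
  match n with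
  | 0 => s
  | n + 1 => solIter n (solStep s 0)

theorem foldl_solStep_eq_iter (l : List Int) (s : Int × Int) :
    l.foldl solStep s = solIter l.length s := by
  induction l generalizing s with
  | nil => rfl
  | cons x xs ih =>
      simp only [List.foldl_cons, List.length_cons, solIter]
      rw [ih]
      rfl

theorem solIter_succ (n : Nat) (s : Int × Int) :
    solIter (n + 1) s = solStep (solIter n s) 0 := by
  induction n generalizing s with
  | zero => rfl
  | succ n ih => exact ih (solStep s 0)

-- closed form of the loop state after n iterations from (0,0)
theorem solIter_closed (n : Nat) :
    solIter n (0, 0) =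
      if n = 0 then (0, 0) else (((n : Int) - 1) % 9 + 1, ((n : Int) - 1) / 9) := by
  induction n with
  | zero => rfl
  | succ n ih =>
      rw [solIter_succ, ih]
      by_cases h : n = 0
      · subst h; simp [solStep]
      · simp only [h, Nat.succ_ne_zero, if_false]
        have hn : (1 : Int) ≤ (n : Int) := by exact_mod_cast Nat.one_le_iff_ne_zero.mpr h
        simp only [solStep]
        by_cases hc : ((n : Int) - 1) % 9 + 1 + 1 = 10
        · simp only [hc, if_pos, Prod.mk.injEq]
          push_cast
          omega
        · simp only [hc, if_false, Prod.mk.injEq]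
          push_cast
          omega

theorem solution_closed (chicken : Int) :
    solution chicken = if chicken ≤ 0 then 0 else (chicken - 1) / 9 := by
  unfold solution
  rw [foldl_solStep_eq_iter, PySem.List.length_pyRange_one, solIter_closed]
  by_cases h : chicken ≤ 0
  · have h0 : (chicken + 1 - 1).toNat = 0 := by omega
    rw [h0, if_pos rfl, if_pos h]
  · have h1 : (chicken + 1 - 1).toNat ≠ 0 := by omega
    have h2 : ((chicken + 1 - 1).toNat : Int) = chicken := by omega
    rw [if_neg h1, if_neg h, h2]

theorem solution_spec' (chicken : Int) : solution chicken = solution_alt chicken := by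
  rw [solution_closed]
  unfold solution_alt
  rw [PySem.Int.floordiv_eq_ediv_of_pos (by norm_num)]
  rw [max_def]
  split_ifs <;> omega

-- ===== VERDICT (by name: the statement is the Claim_ definition above) =====
theorem solution_spec : Claim_equal_solution := by
  intro chicken _
  exact solution_spec' chicken
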